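-- pv_equiv track=rewrite | github.com/nimitshresthadel/Multi_Agent_Code_Analysis | code-analysis-system/backend/app/services/repo_analyser.py | _infer_tech_from_deps
-- ===== SOURCE A (Python) =====
-- from typing import Dict, List, Optional, Tuple
--
-- def _infer_tech_from_deps(deps: Dict) -> List[str]:
--     """Infer technology stack from dependencies."""
--     tech = []
--
--     tech_mapping = {
--         "fastapi": "FastAPI",
--         "flask": "Flask",
--         "django": "Django",
--         "express": "Express.js",
--         "react": "React",
--         "vue": "Vue.js",
--         "angular": "Angular",
--         "sqlalchemy": "SQLAlchemy",
--         "mongoose": "MongoDB",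
--         "redis": "Redis",
--         "celery": "Celery",
--         "pytest": "PyTest",
--         "jest": "Jest"
--     }
--
--     for dep_name, tech_name in tech_mapping.items():
--         if any(dep_name in d.lower() for d in deps.keys()):
--             tech.append(tech_name)
--
--     return tech
-- ===== SOURCE B (Python) =====
-- def _infer_tech_from_deps(deps):
--     """Infer technology stack from dependencies via a substring index:
--     enumerate every slice of each lowercased key at the distinct keyword
--     lengths into a set, then answer each keyword by exact-match lookup."""
--     tech_mapping = {
--         "fastapi": "FastAPI",
--         "flask": "Flask",
--         "django": "Django",
--         "express": "Express.js",
--         "react": "React",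
--         "vue": "Vue.js",
--         "angular": "Angular",
--         "sqlalchemy": "SQLAlchemy",
--         "mongoose": "MongoDB",
--         "redis": "Redis",
--         "celery": "Celery",
--         "pytest": "PyTest",
--         "jest": "Jest"
--     }
--     lengths = sorted({len(kw) for kw in tech_mapping})
--     seen = set()
--     for d in deps.keys():
--         dl = d.lower()
--         for i in range(len(dl)):
--             for L in lengths:
--                 seen.add(dl[i:i + L])
--     return [name for kw, name in tech_mapping.items() if kw in seen]
-- ===== Notes on version B (the rewrite author's own statement) =====
-- stated objective: alternative
-- what changed: B builds a substring index: one pass over the keys enumerates every slice of each lowercased key at the 7 distinct keyword lengths into a set, and each keyword is then answered by a single exact-match set lookup instead of A's 13 per-keyword substring searches over all keys.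
import Mathlib
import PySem

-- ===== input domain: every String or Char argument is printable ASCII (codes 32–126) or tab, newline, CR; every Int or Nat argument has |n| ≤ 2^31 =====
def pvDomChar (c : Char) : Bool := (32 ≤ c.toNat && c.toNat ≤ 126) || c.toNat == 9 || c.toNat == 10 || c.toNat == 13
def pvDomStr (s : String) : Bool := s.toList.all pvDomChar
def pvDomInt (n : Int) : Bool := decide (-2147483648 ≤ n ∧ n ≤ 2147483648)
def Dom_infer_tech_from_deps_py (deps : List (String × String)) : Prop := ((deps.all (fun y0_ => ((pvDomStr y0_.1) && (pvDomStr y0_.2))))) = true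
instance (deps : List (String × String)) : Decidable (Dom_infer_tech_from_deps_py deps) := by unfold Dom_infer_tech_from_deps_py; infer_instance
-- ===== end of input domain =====

-- B replaces A's 13 per-keyword substring searches over the keys by a substring index:
-- it enumerates every slice of each lowercased key at the distinct keyword lengths into a set,
-- then answers each keyword by one exact-match set lookup (alternative algorithm, similar cost).


-- the literal tech_mapping dict (insertion order), shared data of both ports
def pvTechMapping : List (String × String) :=
  [("fastapi", "FastAPI"), ("flask", "Flask"), ("django", "Django"),
   ("express", "Express.js"), ("react", "React"), ("vue", "Vue.js"),
   ("angular", "Angular"), ("sqlalchemy", "SQLAlchemy"), ("mongoose", "MongoDB"),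
   ("redis", "Redis"), ("celery", "Celery"), ("pytest", "PyTest"), ("jest", "Jest")]

-- ===== PORT A =====
-- for dep_name, tech_name in tech_mapping.items(): if any(dep_name in d.lower() for d in deps.keys()): tech.append(tech_name)
def infer_tech_from_deps_py (deps : List (String × String)) : List String :=
  pvTechMapping.foldl
    (fun tech p =>
      if ((PySem.Dict.mk deps).keys).any
          (fun d => PySem.Str.isIn p.1 (PySem.Str.lower d)) then tech ++ [p.2] else tech)
    []

-- ===== PORT B =====
-- lengths = sorted({len(kw) for kw in tech_mapping})
def pvKwLengths : List Int :=
  PySem.List.sorted (PySem.Set.ofList (pvTechMapping.map (fun p => PySem.Str.len p.1))) (fun x => x)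

-- for d in deps.keys(): dl = d.lower(); for i in range(len(dl)): for L in lengths: seen.add(dl[i:i+L])
def pvSeen (deps : List (String × String)) : PySem.Set String :=
  ((PySem.Dict.mk deps).keys).foldl
    (fun seen d =>
      let dl := PySem.Str.lower d
      (PySem.List.pyRange 0 (PySem.Str.len dl) 1).foldl
        (fun seen i =>
          pvKwLengths.foldl
            (fun seen L => PySem.Set.add seen (PySem.Str.slice dl (some i) (some (i + L)))) seen)
        seen)
    PySem.Set.empty

-- return [name for kw, name in tech_mapping.items() if kw in seen]
def infer_tech_from_deps_py_alt (deps : List (String × String)) : List String :=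
  (pvTechMapping.filter (fun p => PySem.Set.contains (pvSeen deps) p.1)).map Prod.snd

-- ===== PRECONDITION & SPEC =====
def Spec_infer_tech_from_deps_py (deps : List (String × String)) (out : List String) : Prop := out = infer_tech_from_deps_py_alt deps
instance (deps : List (String × String)) (out : List String) : Decidable (Spec_infer_tech_from_deps_py deps out) := by unfold Spec_infer_tech_from_deps_py; infer_instance

-- ===== CLAIM (what is proved, stated in full; the proofs are below) =====
def Claim_equal_infer_tech_from_deps_py : Prop := ∀ (deps : List (String × String)), Dom_infer_tech_from_deps_py deps → Spec_infer_tech_from_deps_py deps (infer_tech_from_deps_py deps)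

-- ===== LEMMAS AND PROOFS =====

-- generic membership law for a foldl whose step only ever ADDS elements (law h)
theorem pv_mem_foldl {β : Type} (l : List β) (g : PySem.Set String → β → PySem.Set String)
    (P : β → String → Prop) (h : ∀ s b y, y ∈ g s b ↔ y ∈ s ∨ P b y)
    (s : PySem.Set String) (y : String) :
    y ∈ l.foldl g s ↔ y ∈ s ∨ ∃ b ∈ l, P b y := by
  induction l generalizing s with
  | nil => simp
  | cons b rest ih =>
    simp only [List.foldl_cons, ih, h]
    constructor
    · rintro ((hs | hb) | ⟨b', hb', hp⟩)
      · exact Or.inl hs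
      · exact Or.inr ⟨b, List.mem_cons_self .., hb⟩
      · exact Or.inr ⟨b', List.mem_cons_of_mem _ hb', hp⟩
    · rintro (hs | ⟨b', hb', hp⟩)
      · exact Or.inl (Or.inl hs)
      · rcases List.mem_cons.mp hb' with rfl | hr
        · exact Or.inl (Or.inr hp)
        · exact Or.inr ⟨b', hr, hp⟩

-- what the substring index contains
theorem pv_mem_seen (deps : List (String × String)) (y : String) :
    y ∈ pvSeen deps ↔
      ∃ d ∈ (PySem.Dict.mk deps).keys,
        ∃ i ∈ PySem.List.pyRange 0 (PySem.Str.len (PySem.Str.lower d)) 1,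
          ∃ L ∈ pvKwLengths,
            y = PySem.Str.slice (PySem.Str.lower d) (some i) (some (i + L)) := by
  unfold pvSeen
  rw [pv_mem_foldl _ _
      (fun d y => ∃ i ∈ PySem.List.pyRange 0 (PySem.Str.len (PySem.Str.lower d)) 1,
        ∃ L ∈ pvKwLengths, y = PySem.Str.slice (PySem.Str.lower d) (some i) (some (i + L)))]
  · simp [PySem.Set.empty]
  · intro s d y
    exact pv_mem_foldl _ _
      (fun i y => ∃ L ∈ pvKwLengths,
        y = PySem.Str.slice (PySem.Str.lower d) (some i) (some (i + L)))
      (fun s i y => PySem.Set.mem_foldl_add pvKwLengths _ s y) s y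

-- for a keyword (nonempty, length in the index's length list), indexed slice hit = substring hit
theorem pv_slice_iff_isIn (kw dl : String) (hne : kw.toList ≠ [])
    (hlen : PySem.Str.len kw ∈ pvKwLengths) :
    (∃ i ∈ PySem.List.pyRange 0 (PySem.Str.len dl) 1,
        ∃ L ∈ pvKwLengths, kw = PySem.Str.slice dl (some i) (some (i + L))) ↔
      PySem.Str.isIn kw dl = true := by
  have hpos : ∀ L ∈ pvKwLengths, 0 < L := by decide
  rw [PySem.Str.isIn_iff_infix]
  constructor
  · rintro ⟨i, hi, L, hL, heq⟩
    rw [PySem.List.mem_pyRange_one] at hi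
    have h0L : 0 ≤ i + L := by have := hpos L hL; omega
    have : kw.toList = (dl.toList.drop i.toNat).take ((i + L).toNat - i.toNat) := by
      rw [heq, PySem.Str.toList_slice, PySem.Chars.slice_eq_listSlice,
        PySem.List.slice_toNat _ hi.1 h0L]
    rw [this]
    exact (List.take_prefix _ _).isInfix.trans (List.drop_suffix _ _).isInfix
  · rintro ⟨s, t, hst⟩
    refine ⟨(s.length : Int), ?_, PySem.Str.len kw, hlen, ?_⟩
    · rw [PySem.List.mem_pyRange_one, PySem.Str.len_eq, ← hst]
      have : 0 < kw.toList.length := List.length_pos_iff.mpr hne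
      simp only [List.length_append]
      omega
    · apply String.toList_inj.mp
      rw [PySem.Str.toList_slice, PySem.Chars.slice_eq_listSlice, PySem.Str.len_eq,
        PySem.List.slice_natCast_add dl.toList s.length kw.toList.length, ← hst,
        List.append_assoc, List.drop_left, List.take_left]

-- the two Boolean conditions agree on every pair of the mapping
theorem pv_cond_eq (deps : List (String × String)) (p : String × String) (hp : p ∈ pvTechMapping) :
    ((PySem.Dict.mk deps).keys).any (fun d => PySem.Str.isIn p.1 (PySem.Str.lower d)) =
      PySem.Set.contains (pvSeen deps) p.1 := by
  have hfacts : ∀ q ∈ pvTechMapping, q.1.toList ≠ [] ∧ PySem.Str.len q.1 ∈ pvKwLengths := by decide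
  obtain ⟨hne, hlen⟩ := hfacts p hp
  rw [Bool.eq_iff_iff, List.any_eq_true, PySem.Set.contains_iff, pv_mem_seen]
  constructor
  · rintro ⟨d, hd, hin⟩
    exact ⟨d, hd, (pv_slice_iff_isIn p.1 (PySem.Str.lower d) hne hlen).mpr hin⟩
  · rintro ⟨d, hd, hex⟩
    exact ⟨d, hd, (pv_slice_iff_isIn p.1 (PySem.Str.lower d) hne hlen).mp hex⟩

-- ===== VERDICT (by name: the statement is the Claim_ definition above) =====
theorem infer_tech_from_deps_py_spec : Claim_equal_infer_tech_from_deps_py := by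
  intro deps _
  show infer_tech_from_deps_py deps = infer_tech_from_deps_py_alt deps
  unfold infer_tech_from_deps_py infer_tech_from_deps_py_alt
  have hc :
      pvTechMapping.foldl
        (fun tech p =>
          if ((PySem.Dict.mk deps).keys).any
              (fun d => PySem.Str.isIn p.1 (PySem.Str.lower d)) then tech ++ [p.2] else tech)
        [] =
      pvTechMapping.foldl
        (fun tech p => if PySem.Set.contains (pvSeen deps) p.1 then tech ++ [p.2] else tech)
        [] :=
    by apply PySem.List.foldl_congr_mem; intro acc p hp; rw [pv_cond_eq deps p hp]
  rw [hc, PySem.List.foldl_append_if]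
  simp
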